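-- pv_equiv track=rewrite | github.com/rhythm-semwal/DS-Algo | Searching/Maximum height of staircase.py | solve
-- ===== SOURCE A (Python) =====
-- def solve(A):
--     low = 1
--     high = 1000000000
--     ans = 0
--     while (low <= high):
--         mid = (low + high) // 2
--         val = ((mid) * (mid + 1)) // 2
--         if (val == A):
--             return mid
--         elif (val < A):
--             ans = max(ans, mid)
--             low = mid + 1
--         else:
--             high = mid - 1
--     return ans
-- ===== SOURCE B (Python) =====
-- def solve(A):
--     # closed form: invert the triangular-number function with an integer square root
--     if A < 1:
--         return 0
--     m = 8 * A + 1
--     # hand-rolled integer square root (Newton's method)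
--     x = m
--     y = (x + 1) // 2
--     while y < x:
--         x = y
--         y = (x + m // x) // 2
--     return (x - 1) // 2
-- ===== Notes on version B (the rewrite author's own statement) =====
-- stated objective: alternative
-- what changed: Replaces the binary search over candidate heights with the closed-form inverse triangular-number formula, computed exactly via a hand-rolled Newton integer square root.
import Mathlib
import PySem

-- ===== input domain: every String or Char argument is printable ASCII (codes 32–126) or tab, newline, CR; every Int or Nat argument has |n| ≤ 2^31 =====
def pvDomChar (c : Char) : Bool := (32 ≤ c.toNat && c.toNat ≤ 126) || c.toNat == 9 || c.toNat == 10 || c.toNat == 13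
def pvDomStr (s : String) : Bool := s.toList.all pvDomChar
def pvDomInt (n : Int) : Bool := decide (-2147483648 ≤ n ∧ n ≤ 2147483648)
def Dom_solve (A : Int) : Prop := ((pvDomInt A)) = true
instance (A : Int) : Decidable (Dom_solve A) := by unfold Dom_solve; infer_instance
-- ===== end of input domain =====

-- B replaces the binary search with the closed-form inverse triangular-number formula via a hand-rolled Newton integer square root.

-- ===== PORT A =====
-- the while-loop of A, state (low, high, ans); terminates since the interval shrinks
def solveLoop (A low high ans : Int) : Int :=
  if _h : low ≤ high then
    let mid := PySem.Int.floordiv (low + high) 2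
    let val := PySem.Int.floordiv (mid * (mid + 1)) 2
    if val = A then mid
    else if val < A then solveLoop A (mid + 1) high (max ans mid)
    else solveLoop A low (mid - 1) ans
  else ans
termination_by (high - low + 1).toNat
decreasing_by
  · have := PySem.Int.floordiv_two_mid_bounds _h; omega
  · have := PySem.Int.floordiv_two_mid_bounds _h; omega

def solve (A : Int) : Int := solveLoop A 1 1000000000 0

-- ===== PORT B =====
-- the Newton while-loop of B; the '0 ≤ y' conjunct is a totality guard only
-- (on every reachable state 1 ≤ y), needed so the measure x.toNat decreases
def newtonLoop (m x y : Int) : Int :=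
  if _h : 0 ≤ y ∧ y < x then
    newtonLoop m y (PySem.Int.floordiv (y + PySem.Int.floordiv m y) 2)
  else x
termination_by x.toNat
decreasing_by omega

def solve_alt (A : Int) : Int :=
  if A < 1 then 0
  else
    let m := 8 * A + 1
    let x := newtonLoop m m (PySem.Int.floordiv (m + 1) 2)
    PySem.Int.floordiv (x - 1) 2

-- ===== PRECONDITION & SPEC =====
def Spec_solve (A : Int) (out : Int) : Prop := out = solve_alt A
instance (A : Int) (out : Int) : Decidable (Spec_solve A out) := by unfold Spec_solve; infer_instance

-- ===== CLAIM (what is proved, stated in full; the proofs are below) =====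
def Claim_equal_solve : Prop := ∀ (A : Int), Dom_solve A → Spec_solve A (solve A)

-- ===== LEMMAS AND PROOFS =====

-- triangular numbers are strictly increasing on the nonnegatives, so the
-- sandwiched index is unique
theorem tri_unique (A n m : Int) (hn : 0 ≤ n) (hm : 0 ≤ m)
    (h1 : n * (n + 1) ≤ 2 * A) (h2 : 2 * A < (n + 1) * (n + 2))
    (h3 : m * (m + 1) ≤ 2 * A) (h4 : 2 * A < (m + 1) * (m + 2)) : n = m := by
  rcases lt_trichotomy n m with h | h | h
  · exfalso; nlinarith
  · exact h
  · exfalso; nlinarith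

theorem half_even (k : Int) : PySem.Int.floordiv (k + k) 2 = k :=
  (PySem.Int.floordiv_eq_iff_of_pos (by norm_num)).mpr ⟨by omega, by omega⟩

theorem two_mul_val (n : Int) :
    2 * PySem.Int.floordiv (n * (n + 1)) 2 = n * (n + 1) := by
  obtain ⟨k, hk⟩ := Int.even_mul_succ_self n
  rw [hk, half_even]; omega

-- the binary search returns the unique N with N(N+1) ≤ 2A < (N+1)(N+2)
theorem solveLoop_correct (A N : Int) (hA : 1 ≤ A)
    (hN1 : N * (N + 1) ≤ 2 * A) (hN2 : 2 * A < (N + 1) * (N + 2)) :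
    ∀ k (low high ans : Int), (high - low + 1).toNat ≤ k → 0 ≤ ans → ans ≤ N →
      low = ans + 1 → N ≤ high → solveLoop A low high ans = N := by
  intro k
  induction k with
  | zero =>
    intro low high ans hk h0 h1 h2 h3
    rw [solveLoop, dif_neg (by omega)]; omega
  | succ k ih =>
    intro low high ans hk h0 h1 h2 h3
    rw [solveLoop]
    by_cases hlh : low ≤ high
    · rw [dif_pos hlh]
      dsimp only []
      obtain ⟨hm1, hm2⟩ := PySem.Int.floordiv_two_mid_bounds hlh
      have hv := two_mul_val (PySem.Int.floordiv (low + high) 2)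
      set mid := PySem.Int.floordiv (low + high) 2 with hmid
      set val := PySem.Int.floordiv (mid * (mid + 1)) 2 with hval
      split_ifs with he hl
      · -- val = A : mid is the sandwiched index
        exact tri_unique A mid N (by omega) (by omega)
          (by nlinarith) (by nlinarith) hN1 hN2
      · -- val < A : go right, ans := mid
        have hmidN : mid ≤ N := by
          by_contra h; push Not at h; nlinarith
        have hmax : max ans mid = mid := by omega
        rw [hmax]
        exact ih (mid + 1) high mid (by omega) (by omega) hmidN rfl h3
      · -- val > A : go left
        have hlt : N ≤ mid - 1 := by
          by_contra h; push Not at h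
          have hva : A + 1 ≤ val := by omega
          nlinarith [mul_nonneg (by omega : (0:Int) ≤ N - mid)
            (by omega : (0:Int) ≤ N + mid + 1)]
        exact ih low (mid - 1) ans (by omega) h0 h1 h2 hlt
    · rw [dif_neg hlh]; omega

-- for A < 1 every probe overshoots and the search returns the initial ans = 0
theorem solveLoop_nonpos (A : Int) (hA : A < 1) :
    ∀ k (low high : Int), (high - low + 1).toNat ≤ k → 1 ≤ low →
      solveLoop A low high 0 = 0 := by
  intro k
  induction k with
  | zero =>
    intro low high hk h1
    rw [solveLoop, dif_neg (by omega)]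
  | succ k ih =>
    intro low high hk h1
    rw [solveLoop]
    by_cases hlh : low ≤ high
    · rw [dif_pos hlh]
      dsimp only []
      obtain ⟨hm1, hm2⟩ := PySem.Int.floordiv_two_mid_bounds hlh
      have hv := two_mul_val (PySem.Int.floordiv (low + high) 2)
      set mid := PySem.Int.floordiv (low + high) 2 with hmid
      set val := PySem.Int.floordiv (mid * (mid + 1)) 2 with hval
      have hval1 : 1 ≤ val := by nlinarith
      split_ifs with he hl
      · omega
      · omega
      · exact ih low (mid - 1) (by omega) h1
    · rw [dif_neg hlh]

-- Newton's iteration, started at or above ⌊√m⌋, converges to ⌊√m⌋ = s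
theorem newtonLoop_correct (m s : Int) (hm : 1 ≤ m) (hs1 : 1 ≤ s)
    (hs2 : s * s ≤ m) (hs3 : m < (s + 1) * (s + 1)) :
    ∀ k (x y : Int), x.toNat ≤ k → s ≤ x → s ≤ y → 1 ≤ y →
      (y = PySem.Int.floordiv (x + PySem.Int.floordiv m x) 2 ∨
        (x = m ∧ y = PySem.Int.floordiv (m + 1) 2)) →
      newtonLoop m x y = s := by
  intro k
  induction k with
  | zero => intro x y hk hx hy hy1 hlink; omega
  | succ k ih =>
    intro x y hk hx hy hy1 hlink
    rw [newtonLoop]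
    by_cases hc : 0 ≤ y ∧ y < x
    · rw [dif_pos hc]
      have hy0 : (0 : Int) < y := by omega
      have hq := PySem.Int.floordiv_mul_add_mod m y
      have hq0 := PySem.Int.mod_nonneg m hy0
      have hq1 := PySem.Int.mod_lt m hy0
      set q := PySem.Int.floordiv m y with hqdef
      have hsum : 2 * s ≤ y + q := by
        by_contra h; push Not at h
        nlinarith [sq_nonneg (s - y)]
      have hd := PySem.Int.floordiv_mul_add_mod (y + q) 2
      have hd0 := PySem.Int.mod_nonneg (y + q) (b := 2) (by norm_num)
      have hd1 := PySem.Int.mod_lt (y + q) (b := 2) (by norm_num)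
      exact ih y _ (by omega) hy (by omega) (by omega) (Or.inl rfl)
    · rw [dif_neg hc]
      have hxy : x ≤ y := by omega
      rcases hlink with hl | ⟨hxm, hyv⟩
      · have hx0 : (0 : Int) < x := by omega
        have hq := PySem.Int.floordiv_mul_add_mod m x
        have hq0 := PySem.Int.mod_nonneg m hx0
        have hq1 := PySem.Int.mod_lt m hx0
        set q := PySem.Int.floordiv m x with hqdef
        have hd := PySem.Int.floordiv_mul_add_mod (x + q) 2
        have hd0 := PySem.Int.mod_nonneg (x + q) (b := 2) (by norm_num)
        have hd1 := PySem.Int.mod_lt (x + q) (b := 2) (by norm_num)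
        -- y ≥ x forces q ≥ x hence x*x ≤ m, so x ≤ s
        have hqx : x ≤ q := by omega
        have hxs : x ≤ s := by
          by_contra h; push Not at h; nlinarith
        omega
      · have hd := PySem.Int.floordiv_mul_add_mod (m + 1) 2
        have hd0 := PySem.Int.mod_nonneg (m + 1) (b := 2) (by norm_num)
        have hd1 := PySem.Int.mod_lt (m + 1) (b := 2) (by norm_num)
        have hm1 : m = 1 := by omega
        have : s = 1 := by nlinarith
        omega

-- ===== VERDICT (by name: the statement is the Claim_ definition above) =====
theorem solve_spec : Claim_equal_solve := by
  intro A hdom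
  have hA32 : A ≤ 2147483648 := by
    unfold Dom_solve pvDomInt at hdom
    simp only [decide_eq_true_eq] at hdom
    exact hdom.2
  unfold Spec_solve solve solve_alt
  by_cases hA : A < 1
  · rw [if_pos hA]
    exact solveLoop_nonpos A hA 1000000000 1 1000000000 (by omega) (by omega)
  · rw [if_neg hA]
    push Not at hA
    set m : Int := 8 * A + 1 with hmdef
    have hm1 : (9 : Int) ≤ m := by omega
    have hmn : (m.toNat : Int) = m := Int.toNat_of_nonneg (by omega)
    set s : Int := ((Nat.sqrt m.toNat : Nat) : Int) with hsdef
    have hs2 : s * s ≤ m := by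
      have h := Nat.sqrt_le m.toNat
      have := hmn; exact_mod_cast (by exact_mod_cast h : ((Nat.sqrt m.toNat * Nat.sqrt m.toNat : Nat) : Int) ≤ (m.toNat : Int)).trans_eq hmn
    have hs3 : m < (s + 1) * (s + 1) := by
      have h := Nat.lt_succ_sqrt m.toNat
      have h' : (m.toNat : Int) < ((Nat.sqrt m.toNat + 1 : Nat) : Int) * ((Nat.sqrt m.toNat + 1 : Nat) : Int) := by exact_mod_cast h
      rw [hmn] at h'; push_cast at h'; linarith
    have hs1 : 1 ≤ s := by
      have h : 1 ≤ Nat.sqrt m.toNat := Nat.le_sqrt.mpr (by omega)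
      rw [hsdef]; exact_mod_cast h
    have hyd := PySem.Int.floordiv_mul_add_mod (m + 1) 2
    have hyd0 := PySem.Int.mod_nonneg (m + 1) (b := 2) (by norm_num)
    have hyd1 := PySem.Int.mod_lt (m + 1) (b := 2) (by norm_num)
    have hnewton : newtonLoop m m (PySem.Int.floordiv (m + 1) 2) = s := by
      apply newtonLoop_correct m s (by omega) hs1 hs2 hs3 m.toNat m _ (by omega)
        (by nlinarith) (by nlinarith) (by omega) (Or.inr ⟨rfl, rfl⟩)
    simp only []
    rw [hnewton]
    have hNd := PySem.Int.floordiv_mul_add_mod (s - 1) 2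
    have hNd0 := PySem.Int.mod_nonneg (s - 1) (b := 2) (by norm_num)
    have hNd1 := PySem.Int.mod_lt (s - 1) (b := 2) (by norm_num)
    set N := PySem.Int.floordiv (s - 1) 2 with hNdef
    have hN0 : 0 ≤ N := by omega
    have hN1 : N * (N + 1) ≤ 2 * A := by nlinarith
    have hN2 : 2 * A < (N + 1) * (N + 2) := by nlinarith
    have hNhigh : N ≤ 1000000000 := by nlinarith
    exact solveLoop_correct A N hA hN1 hN2 1000000001 1 1000000000 0
      (by omega) le_rfl hN0 rfl hNhigh
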